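-- pv_equiv track=rewrite | github.com/tos-kamiya/d2vg | d2vg.py | extract_leading_text
-- ===== SOURCE A (Python) =====
-- def extract_leading_text(lines):
--     upper_limit = 80
--     if not lines:
--         return ""
--     leading_text = lines[0]
--     for L in lines[1:]:
--         leading_text += "|" + L.strip()
--         if len(leading_text) >= upper_limit:
--             leading_text = leading_text[:upper_limit]
--             return leading_text
--     return leading_text
-- ===== SOURCE B (Python) =====
-- def extract_leading_text(lines):
--     if not lines:
--         return ""
--     return (lines[0] + "".join("|" + L.strip() for L in lines[1:]))[:80]
-- ===== Notes on version B (the rewrite author's own statement) =====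
-- stated objective: idiomatic
-- what changed: Replaces the accumulating loop with per-iteration length check and early return by a single join expression followed by one final [:80] slice.
-- intended difference: On a single-element list whose only line is longer than 80 characters, A returns it untruncated (the length check runs only after an append, which never happens), while B returns the first 80 characters, which is the intended 80-char cap. — e.g. on extract_leading_text(["aaaaaaaaaaaaaaaaaaaaaaaaaaaaaaaaaaaaaaaaaaaaaaaaaaaaaaaaaaaaaaaaaaaaaaaaaaaaaaaab"]): A returns "aaaaaaaaaaaaaaaaaaaaaaaaaaaaaaaaaaaaaaaaaaaaaaaaaaaaaaaaaaaaaaaaaaaaaaaaaaaaaaaab", B returns "aaaaaaaaaaaaaaaaaaaaaaaaaaaaaaaaaaaaaaaaaaaaaaaaaaaaaaaaaaaaaaaaaaaaaaaaaaaaaaaa"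
import Mathlib
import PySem

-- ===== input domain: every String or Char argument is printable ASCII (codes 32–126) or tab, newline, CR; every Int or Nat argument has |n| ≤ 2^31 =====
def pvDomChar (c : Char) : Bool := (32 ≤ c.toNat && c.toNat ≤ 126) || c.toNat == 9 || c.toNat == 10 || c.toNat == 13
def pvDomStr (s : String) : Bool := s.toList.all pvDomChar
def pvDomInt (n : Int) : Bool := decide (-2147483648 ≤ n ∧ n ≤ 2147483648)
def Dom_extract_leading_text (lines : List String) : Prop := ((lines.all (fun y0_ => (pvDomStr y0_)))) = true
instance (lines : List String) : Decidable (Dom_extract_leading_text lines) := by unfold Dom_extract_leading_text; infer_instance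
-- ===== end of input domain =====

-- B replaces A's accumulate-check-early-return loop by one join expression plus a single
-- final [:80] slice (idiomatic); A and B differ only on a one-element list whose line
-- exceeds 80 chars, where B applies the intended cap and A does not.

-- ===== PORT A =====
def extractLoopA (acc : String) : List String → String
  | [] => acc
  | L :: rest =>
    let acc' := acc ++ ("|" ++ PySem.Str.strip L)
    if 80 ≤ PySem.Str.len acc' then PySem.Str.slice acc' none (some 80)
    else extractLoopA acc' rest

def extract_leading_text (lines : List String) : String :=
  match lines with
  | [] => ""
  | l0 :: rest => extractLoopA l0 rest

-- ===== PORT B =====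
def extract_leading_text_alt (lines : List String) : String :=
  match lines with
  | [] => ""
  | l0 :: rest =>
    PySem.Str.slice (l0 ++ PySem.Str.join "" (rest.map (fun L => "|" ++ PySem.Str.strip L))) none (some 80)

-- ===== PRECONDITION & SPEC =====
-- On a single-element list whose only line is longer than 80 chars, A returns it untruncated
-- (its length check runs only after an append, which never happens), while B returns the first
-- 80 characters — the intended 80-char cap.
def D_extract_leading_text (lines : List String) : Prop :=
  lines.length = 1 ∧ 80 < (lines.headD "").length
instance (lines : List String) : Decidable (D_extract_leading_text lines) := by
  unfold D_extract_leading_text; infer_instance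

def Spec_extract_leading_text (lines : List String) (out : String) : Prop :=
  ¬ D_extract_leading_text lines → out = extract_leading_text_alt lines
instance (lines : List String) (out : String) : Decidable (Spec_extract_leading_text lines out) := by
  unfold Spec_extract_leading_text; infer_instance

def pvDiffWitness_extract_leading_text : List String :=
  ["aaaaaaaaaaaaaaaaaaaaaaaaaaaaaaaaaaaaaaaaaaaaaaaaaaaaaaaaaaaaaaaaaaaaaaaaaaaaaaaab"]
def pvDiffWitnessOut_extract_leading_text : String × String :=
  ("aaaaaaaaaaaaaaaaaaaaaaaaaaaaaaaaaaaaaaaaaaaaaaaaaaaaaaaaaaaaaaaaaaaaaaaaaaaaaaaab",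
   "aaaaaaaaaaaaaaaaaaaaaaaaaaaaaaaaaaaaaaaaaaaaaaaaaaaaaaaaaaaaaaaaaaaaaaaaaaaaaaaa")

-- ===== CLAIM (what is proved, stated in full; the proofs are below) =====
def Claim_unchanged_extract_leading_text : Prop :=
  ∀ (lines : List String), Dom_extract_leading_text lines →
    Spec_extract_leading_text lines (extract_leading_text lines)
def Claim_changed_extract_leading_text : Prop :=
  Dom_extract_leading_text (pvDiffWitness_extract_leading_text) ∧
  D_extract_leading_text (pvDiffWitness_extract_leading_text) ∧
  extract_leading_text (pvDiffWitness_extract_leading_text) = pvDiffWitnessOut_extract_leading_text.1 ∧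
  extract_leading_text_alt (pvDiffWitness_extract_leading_text) = pvDiffWitnessOut_extract_leading_text.2 ∧
  pvDiffWitnessOut_extract_leading_text.1 ≠ pvDiffWitnessOut_extract_leading_text.2
def Claim_exact_extract_leading_text : Prop :=
  ∀ (lines : List String), Dom_extract_leading_text lines → D_extract_leading_text lines →
    extract_leading_text lines ≠ extract_leading_text_alt lines

-- ===== LEMMAS AND PROOFS =====

theorem toList_slice80 (s : String) :
    (PySem.Str.slice s none (some 80)).toList = s.toList.take 80 := by
  rw [PySem.Str.toList_slice]
  simp [PySem.Chars.slice_eq_listSlice, PySem.List.slice_to]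

theorem toList_accStep (acc L : String) :
    (acc ++ ("|" ++ PySem.Str.strip L)).toList =
      acc.toList ++ '|' :: PySem.Chars.strip L.toList := by
  simp

theorem loopA_eq (rest : List String) :
    ∀ acc : String, (rest ≠ [] ∨ acc.toList.length ≤ 80) →
    (extractLoopA acc rest).toList =
      (acc.toList ++ (rest.map (fun L => '|' :: (PySem.Str.strip L).toList)).flatten).take 80 := by
  induction rest with
  | nil =>
    intro acc h
    have h' : acc.toList.length ≤ 80 := by
      rcases h with h | h
      · exact absurd rfl h
      · exact h
    simp [extractLoopA, List.take_of_length_le h']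
  | cons L rest ih =>
    intro acc _
    show (if 80 ≤ PySem.Str.len (acc ++ ("|" ++ PySem.Str.strip L)) then
            PySem.Str.slice (acc ++ ("|" ++ PySem.Str.strip L)) none (some 80)
          else extractLoopA (acc ++ ("|" ++ PySem.Str.strip L)) rest).toList = _
    have hlenEq : PySem.Str.len (acc ++ ("|" ++ PySem.Str.strip L)) =
        ((acc.toList ++ '|' :: PySem.Chars.strip L.toList).length : Int) := by
      simp [PySem.Str.len]
    by_cases hlen : 80 ≤ PySem.Str.len (acc ++ ("|" ++ PySem.Str.strip L))
    · rw [if_pos hlen, toList_slice80, toList_accStep]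
      have hl : 80 ≤ (acc.toList ++ '|' :: PySem.Chars.strip L.toList).length := by
        rw [hlenEq] at hlen; exact_mod_cast hlen
      rw [List.map_cons, List.flatten_cons]
      simp only [PySem.Str.toList_strip]
      rw [← List.append_assoc, List.take_append_of_le_length hl]
    · rw [if_neg hlen]
      have hl : (acc ++ ("|" ++ PySem.Str.strip L)).toList.length ≤ 80 := by
        rw [toList_accStep]
        rw [hlenEq] at hlen; omega
      rw [ih _ (Or.inr hl), toList_accStep]
      simp [List.append_assoc]

theorem join_empty_eq (parts : List (List Char)) :
    PySem.Chars.join [] parts = parts.flatten := by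
  induction parts with
  | nil => simp [PySem.Chars.join, List.intercalate]
  | cons a rest ih =>
    cases rest with
    | nil => simp [PySem.Chars.join, List.intercalate, List.intersperse]
    | cons b r =>
      rw [PySem.Chars.join_cons_cons, ih]
      simp

theorem toList_B (l0 : String) (rest : List String) :
    (extract_leading_text_alt (l0 :: rest)).toList =
      (l0.toList ++ (rest.map (fun L => '|' :: (PySem.Str.strip L).toList)).flatten).take 80 := by
  show (PySem.Str.slice _ none (some 80)).toList = _
  rw [toList_slice80]
  congr 1
  rw [String.toList_append, PySem.Str.toList_join]
  congr 1
  have : ("" : String).toList = ([] : List Char) := rfl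
  rw [this, join_empty_eq]
  congr 1
  simp [Function.comp]

theorem string_eq_of_toList {s t : String} (h : s.toList = t.toList) : s = t := by
  have h2 := congrArg String.ofList h
  simpa using h2

-- ===== VERDICT (by name: the statement is the Claim_ definition above) =====
theorem extract_leading_text_spec : Claim_unchanged_extract_leading_text := by
  intro lines _ hD
  cases lines with
  | nil => rfl
  | cons l0 rest =>
    apply string_eq_of_toList
    rw [toList_B]
    cases rest with
    | nil =>
      have hlen : l0.toList.length ≤ 80 := by
        by_contra hlt
        refine hD ⟨rfl, ?_⟩
        simp only [List.headD_cons]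
        rw [← String.length_toList]
        omega
      exact loopA_eq [] l0 (Or.inr hlen)
    | cons M rest' =>
      exact loopA_eq (M :: rest') l0 (Or.inl (by simp))

theorem extract_leading_text_changed : Claim_changed_extract_leading_text := by
  unfold Claim_changed_extract_leading_text; decide

theorem extract_leading_text_tight : Claim_exact_extract_leading_text := by
  intro lines _ hD heq
  obtain ⟨hlen, hgt⟩ := hD
  cases lines with
  | nil => simp at hlen
  | cons l0 rest =>
    cases rest with
    | cons _ _ => simp at hlen
    | nil =>
      have hgt' : 80 < l0.toList.length := by
        simp only [List.headD_cons] at hgt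
        rw [String.length_toList]
        exact hgt
      have hlenB : (extract_leading_text_alt [l0]).toList.length = 80 := by
        rw [toList_B l0 []]
        simp only [List.map_nil, List.flatten_nil, List.append_nil, List.length_take]
        omega
      have hA : extract_leading_text [l0] = l0 := rfl
      rw [hA] at heq
      rw [← heq] at hlenB
      omega
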